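-- pv_equiv track=rewrite | github.com/fraserbaigent/aoc | 2024/05/solution.py | get_good_lines
-- ===== SOURCE A (Python) =====
-- def get_good_lines(mappings, commands):
--     good_lines = list()
--     for c in commands:
--         good = True
--         for i in range(0, len(c) - 1):
--             for j in range(i + 1, len(c)):
--                 if not (
--                     c[j] in mappings.get(c[i], []) or c[i] not in mappings.get(c[j], [])
--                 ):
--                     good = False
--
--         if good == True:
--             good_lines.append(c)
--     return good_lines
-- ===== SOURCE B (Python) =====
-- def get_good_lines(mappings, commands):
--     good_lines = []
--     for c in commands:
--         first = {}
--         last = {}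
--         for idx, p in enumerate(c):
--             if p not in first:
--                 first[p] = idx
--             last[p] = idx
--         bad = any(
--             a in first
--             and first[a] < last[b]
--             and b not in mappings.get(a, [])
--             for b in last
--             for a in mappings.get(b, [])
--         )
--         if not bad:
--             good_lines.append(c)
--     return good_lines
-- ===== Notes on version B (the rewrite author's own statement) =====
-- stated objective: faster
-- what changed: Instead of A's scan over all index pairs (i,j) of each command, B builds first/last-occurrence position dicts in one enumerate pass and then, for each page b of the command, scans only the rules mappings[b], flagging the command bad when some rule page a occurs before b and b is not in mappings[a].
import Mathlib
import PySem

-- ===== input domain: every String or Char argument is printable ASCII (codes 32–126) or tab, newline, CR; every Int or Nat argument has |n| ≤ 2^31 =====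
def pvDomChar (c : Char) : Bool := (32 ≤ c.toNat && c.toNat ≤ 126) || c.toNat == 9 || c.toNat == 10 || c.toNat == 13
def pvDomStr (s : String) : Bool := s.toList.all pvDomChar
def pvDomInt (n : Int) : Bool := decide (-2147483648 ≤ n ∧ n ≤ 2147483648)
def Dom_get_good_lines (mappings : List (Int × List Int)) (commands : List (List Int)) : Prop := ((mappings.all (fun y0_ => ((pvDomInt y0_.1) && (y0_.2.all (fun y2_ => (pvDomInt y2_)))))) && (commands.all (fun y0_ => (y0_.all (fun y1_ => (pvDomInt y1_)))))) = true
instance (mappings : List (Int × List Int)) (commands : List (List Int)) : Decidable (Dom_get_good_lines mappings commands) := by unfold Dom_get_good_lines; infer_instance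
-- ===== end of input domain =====

-- B replaces A's O(k^2) all-index-pairs scan of each command by first/last-occurrence position dicts
-- built in one pass, checking only the rules keyed by the command's own pages (objective: faster).

-- ===== PORT A =====
-- per-command flag of A: the nested i<j index-pair scan
def pvGoodA (mappings : List (Int × List Int)) (c : List Int) : Bool :=
  (PySem.List.pyRange 0 ((c.length : Int) - 1) 1).foldl (fun good i =>
    (PySem.List.pyRange (i + 1) (c.length : Int) 1).foldl (fun good j =>
      if !(((PySem.Dict.mk mappings).getD (PySem.List.pyGetD c i 0) []).contains (PySem.List.pyGetD c j 0)
            || !((PySem.Dict.mk mappings).getD (PySem.List.pyGetD c j 0) []).contains (PySem.List.pyGetD c i 0))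
      then false else good) good) true

def get_good_lines (mappings : List (Int × List Int)) (commands : List (List Int)) : List (List Int) :=
  commands.foldl (fun good_lines c =>
    if pvGoodA mappings c then good_lines ++ [c] else good_lines) []

-- ===== PORT B =====
-- first[p] = index of first occurrence of p in c (dict built by one enumerate pass)
def pvFirstIdx (c : List Int) : PySem.Dict Int Int :=
  (PySem.List.enumerate c 0).foldl
    (fun d ip => if d.contains ip.2 then d else d.insert ip.2 ip.1) PySem.Dict.empty

-- last[p] = index of last occurrence of p in c
def pvLastIdx (c : List Int) : PySem.Dict Int Int :=
  (PySem.List.enumerate c 0).foldl (fun d ip => d.insert ip.2 ip.1) PySem.Dict.empty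

-- per-command flag of B: for each page b of c, scan only the rules keyed by b
def pvBadB (mappings : List (Int × List Int)) (c : List Int) : Bool :=
  (pvLastIdx c).keys.any (fun b =>
    ((PySem.Dict.mk mappings).getD b []).any (fun a =>
      (pvFirstIdx c).contains a
      && (decide ((pvFirstIdx c).getD a 0 < (pvLastIdx c).getD b 0)
      && !((PySem.Dict.mk mappings).getD a []).contains b)))

def get_good_lines_alt (mappings : List (Int × List Int)) (commands : List (List Int)) : List (List Int) :=
  commands.foldl (fun good_lines c =>
    if !pvBadB mappings c then good_lines ++ [c] else good_lines) []

-- ===== PRECONDITION & SPEC =====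
def Spec_get_good_lines (mappings : List (Int × List Int)) (commands : List (List Int)) (out : List (List Int)) : Prop := out = get_good_lines_alt mappings commands
instance (mappings : List (Int × List Int)) (commands : List (List Int)) (out : List (List Int)) : Decidable (Spec_get_good_lines mappings commands out) := by unfold Spec_get_good_lines; infer_instance

-- ===== CLAIM (what is proved, stated in full; the proofs are below) =====
def Claim_equal_get_good_lines : Prop := ∀ (mappings : List (Int × List Int)) (commands : List (List Int)), Dom_get_good_lines mappings commands → Spec_get_good_lines mappings commands (get_good_lines mappings commands)

-- ===== LEMMAS AND PROOFS =====

-- index of the LAST occurrence of p in c (proof-side mirror of pvLastIdx)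
def pvLa (c : List Int) (p : Int) : Nat :=
  match c with
  | [] => 0
  | _ :: xs => if p ∈ xs then pvLa xs p + 1 else 0

theorem pv_getD_mem (c : List Int) (k : Nat) (h : k < c.length) : c.getD k 0 ∈ c := by
  rw [List.getD_eq_getElem c 0 h]
  exact List.getElem_mem h

-- A's nested fold over index pairs is an all-pairs check
theorem pv_foldl_if_false (l : List Int) (p : Int → Bool) (g : Bool) :
    l.foldl (fun g x => if !(p x) then false else g) g = (g && l.all p) := by
  induction l generalizing g with
  | nil => simp
  | cons x xs ih =>
    simp only [List.foldl_cons]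
    cases hx : p x with
    | false =>
      rw [show (if (!false) = true then false else g) = false from rfl, ih]
      simp [List.all_cons, hx]
    | true =>
      rw [show (if (!true) = true then false else g) = g from rfl, ih]
      simp [List.all_cons, hx]

theorem pv_foldl_and (l : List Int) (f : Int → Bool) (g : Bool) :
    l.foldl (fun g x => g && f x) g = (g && l.all f) := by
  induction l generalizing g with
  | nil => simp
  | cons x xs ih => simp [ih, Bool.and_assoc]

theorem pvGoodA_iff (m : List (Int × List Int)) (c : List Int) :
    pvGoodA m c = true ↔
      ∀ i j : Nat, i < j → j < c.length →
        (c.getD j 0 ∈ (PySem.Dict.mk m).getD (c.getD i 0) [] ∨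
         c.getD i 0 ∉ (PySem.Dict.mk m).getD (c.getD j 0) []) := by
  unfold pvGoodA
  have hb : (fun (good : Bool) (i : Int) =>
      (PySem.List.pyRange (i + 1) (c.length : Int) 1).foldl (fun good j =>
        if !(((PySem.Dict.mk m).getD (PySem.List.pyGetD c i 0) []).contains (PySem.List.pyGetD c j 0)
              || !((PySem.Dict.mk m).getD (PySem.List.pyGetD c j 0) []).contains (PySem.List.pyGetD c i 0))
        then false else good) good)
      = (fun (good : Bool) (i : Int) => good &&
          (PySem.List.pyRange (i + 1) (c.length : Int) 1).all (fun j =>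
            ((PySem.Dict.mk m).getD (PySem.List.pyGetD c i 0) []).contains (PySem.List.pyGetD c j 0)
              || !((PySem.Dict.mk m).getD (PySem.List.pyGetD c j 0) []).contains (PySem.List.pyGetD c i 0))) := by
    funext good i
    exact pv_foldl_if_false _ _ _
  rw [hb, pv_foldl_and]
  simp only [Bool.true_and, List.all_eq_true, PySem.List.mem_pyRange_one]
  constructor
  · intro h i j hij hj
    have hi' : (i : Int) ∈ Set.Ico (0 : Int) ((c.length : Int) - 1) := by
      constructor <;> [positivity; omega]
    have := h (i : Int) ⟨by positivity, by omega⟩ (j : Int) ⟨by omega, by omega⟩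
    simpa [PySem.List.pyGetD_natCast, List.contains_iff_mem] using this
  · intro h i hi j hj
    have h0i : (0:Int) ≤ i := hi.1
    have h0j : (0:Int) ≤ j := by omega
    obtain ⟨i', rfl⟩ : ∃ n : Nat, i = (n : Int) := ⟨i.toNat, (Int.toNat_of_nonneg h0i).symm⟩
    obtain ⟨j', rfl⟩ : ∃ n : Nat, j = (n : Int) := ⟨j.toNat, (Int.toNat_of_nonneg h0j).symm⟩
    have := h i' j' (by omega) (by omega)
    simpa [PySem.List.pyGetD_natCast, List.contains_iff_mem] using this

-- the generic first-occurrence fold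
theorem pv_firstFold_get? (l : List (Int × Int)) (d : PySem.Dict Int Int) (p : Int) :
    (l.foldl (fun d ip => if d.contains ip.2 then d else d.insert ip.2 ip.1) d).get? p
      = (d.get? p).or ((l.find? (fun ip => ip.2 == p)).map (·.1)) := by
  induction l generalizing d with
  | nil => simp
  | cons x xs ih =>
    simp only [List.foldl_cons]
    cases hg : d.get? x.2 with
    | none =>
      have hc : d.contains x.2 = false := by
        rw [PySem.Dict.contains_eq_isSome_get?, hg]; rfl
      rw [hc]
      simp only [Bool.false_eq_true, if_false, ih]
      by_cases hp : x.2 = p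
      · subst hp
        simp [hg, List.find?_cons, PySem.Dict.get?_insert_self]
      · have hne : ¬ (x.2 == p) = true := by simp [hp]
        simp [List.find?_cons, hne,
          PySem.Dict.get?_insert_of_ne (d := d) (v := x.1) (show p ≠ x.2 from fun h => hp h.symm)]
    | some v =>
      have hc : d.contains x.2 = true := by
        rw [PySem.Dict.contains_eq_isSome_get?, hg]; rfl
      rw [hc]
      simp only [if_true, ih]
      by_cases hp : x.2 = p
      · subst hp
        simp [hg, List.find?_cons]
      · have hne : ¬ (x.2 == p) = true := by simp [hp]
        simp [List.find?_cons, hne]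

-- the generic last-occurrence fold
theorem pv_lastFold_get? (l : List (Int × Int)) (d : PySem.Dict Int Int) (p : Int) :
    (l.foldl (fun d ip => d.insert ip.2 ip.1) d).get? p
      = ((l.reverse.find? (fun ip => ip.2 == p)).map (·.1)).or (d.get? p) := by
  induction l generalizing d with
  | nil => simp
  | cons x xs ih =>
    simp only [List.foldl_cons, ih, List.reverse_cons, List.find?_append]
    by_cases hp : x.2 = p
    · subst hp
      cases h : xs.reverse.find? (fun ip => ip.2 == x.2) <;>
        simp [h, PySem.Dict.get?_insert_self]
    · have hne : ¬ (x.2 == p) = true := by simp [hp]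
      cases h : xs.reverse.find? (fun ip => ip.2 == p) <;>
        simp [h, hne, PySem.Dict.get?_insert_of_ne (d := d) (v := x.1) (show p ≠ x.2 from fun h => hp h.symm)]

theorem pv_enum_find (c : List Int) (p : Int) (s : Int) :
    (PySem.List.enumerate c s).find? (fun ip => ip.2 == p)
      = if p ∈ c then some (s + (c.idxOf p : Int), p) else none := by
  induction c generalizing s with
  | nil => simp [PySem.List.enumerate_nil]
  | cons x xs ih =>
    rw [PySem.List.enumerate_cons]
    by_cases hp : x = p
    · subst hp
      simp [List.find?_cons, List.idxOf_cons_self]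
    · have hne : ¬ (x == p) = true := by simp [hp]
      simp only [List.find?_cons, hne, if_neg, ih (s + 1)]
      by_cases hmem : p ∈ xs
      · have : p ∈ x :: xs := List.mem_cons_of_mem _ hmem
        simp [hmem, this, List.idxOf_cons_ne _ hp]
        push_cast
        ring
      · have : p ∉ x :: xs := by simp [hp, hmem, Ne.symm]
        simp [hmem, this]

theorem pv_enum_rev_find (c : List Int) (p : Int) (s : Int) :
    (PySem.List.enumerate c s).reverse.find? (fun ip => ip.2 == p)
      = if p ∈ c then some (s + (pvLa c p : Int), p) else none := by
  induction c generalizing s with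
  | nil => simp [PySem.List.enumerate_nil]
  | cons x xs ih =>
    rw [PySem.List.enumerate_cons]
    simp only [List.reverse_cons, List.find?_append, ih (s + 1)]
    by_cases hmem : p ∈ xs
    · have h1 : p ∈ x :: xs := List.mem_cons_of_mem _ hmem
      simp [hmem, h1, pvLa]
      push_cast
      ring
    · simp only [hmem, if_neg, not_false_iff, Option.none_or]
      by_cases hp : x = p
      · subst hp
        simp [List.find?_cons, pvLa, hmem]
      · have hne : ¬ (x == p) = true := by simp [hp]
        have hnc : p ∉ x :: xs := by
          intro hmem2
          rcases List.mem_cons.mp hmem2 with h | h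
          · exact hp h.symm
          · exact hmem h
        simp [List.find?_cons, hne, hnc]

theorem pvFirstIdx_get? (c : List Int) (p : Int) :
    (pvFirstIdx c).get? p = if p ∈ c then some ((c.idxOf p : Int)) else none := by
  unfold pvFirstIdx
  rw [pv_firstFold_get?, pv_enum_find]
  by_cases h : p ∈ c <;> simp [h, PySem.Dict.get?_empty]

theorem pvLastIdx_get? (c : List Int) (p : Int) :
    (pvLastIdx c).get? p = if p ∈ c then some ((pvLa c p : Int)) else none := by
  unfold pvLastIdx
  rw [pv_lastFold_get?, pv_enum_rev_find]
  by_cases h : p ∈ c <;> simp [h, PySem.Dict.get?_empty]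

theorem pvFirstIdx_contains (c : List Int) (p : Int) :
    (pvFirstIdx c).contains p = true ↔ p ∈ c := by
  rw [PySem.Dict.contains_eq_isSome_get?, pvFirstIdx_get?]
  by_cases h : p ∈ c <;> simp [h]

theorem pvLastIdx_contains (c : List Int) (p : Int) :
    (pvLastIdx c).contains p = true ↔ p ∈ c := by
  rw [PySem.Dict.contains_eq_isSome_get?, pvLastIdx_get?]
  by_cases h : p ∈ c <;> simp [h]

theorem pvFirstIdx_getD (c : List Int) (p : Int) (h : p ∈ c) :
    (pvFirstIdx c).getD p 0 = (c.idxOf p : Int) := by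
  rw [PySem.Dict.getD_eq_get?_getD, pvFirstIdx_get?, if_pos h, Option.getD_some]

theorem pvLastIdx_getD (c : List Int) (p : Int) (h : p ∈ c) :
    (pvLastIdx c).getD p 0 = (pvLa c p : Int) := by
  rw [PySem.Dict.getD_eq_get?_getD, pvLastIdx_get?, if_pos h, Option.getD_some]

-- pvLa is a position of p, and the largest one
theorem pvLa_spec (c : List Int) (p : Int) (h : p ∈ c) :
    pvLa c p < c.length ∧ c.getD (pvLa c p) 0 = p ∧
      ∀ k, pvLa c p < k → k < c.length → c.getD k 0 ≠ p := by
  induction c with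
  | nil => cases h
  | cons x xs ih =>
    by_cases hmem : p ∈ xs
    · obtain ⟨h1, h2, h3⟩ := ih hmem
      refine ⟨by simp [pvLa, hmem]; omega, by simpa [pvLa, hmem] using h2, ?_⟩
      intro k hk hklen
      simp only [pvLa, hmem, if_pos] at hk
      obtain ⟨k', rfl⟩ : ∃ k', k = k' + 1 := ⟨k - 1, by omega⟩
      simpa using h3 k' (by omega) (by simpa using hklen)
    · have hx : x = p := by
        rcases List.mem_cons.mp h with h' | h'
        · exact h'.symm
        · exact absurd h' hmem
      subst hx
      refine ⟨by simp [pvLa, hmem], by simp [pvLa, hmem], ?_⟩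
      intro k hk hklen
      simp only [pvLa, hmem, if_neg, not_false_iff] at hk
      obtain ⟨k', rfl⟩ : ∃ k', k = k' + 1 := ⟨k - 1, by omega⟩
      intro hkp
      exact hmem (hkp ▸ (by
        have : xs.getD k' 0 ∈ xs := pv_getD_mem _ _ (by simpa using hklen)
        simpa using this))

-- idxOf is a position of p, and the smallest one
theorem pv_idxOf_spec (c : List Int) (p : Int) (h : p ∈ c) :
    c.idxOf p < c.length ∧ c.getD (c.idxOf p) 0 = p ∧
      ∀ k, k < c.idxOf p → c.getD k 0 ≠ p := by
  induction c with
  | nil => cases h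
  | cons x xs ih =>
    by_cases hx : x = p
    · subst hx
      simp [List.idxOf_cons_self]
    · have hmem : p ∈ xs := by
        rcases List.mem_cons.mp h with h' | h'
        · exact absurd h'.symm hx
        · exact h'
      obtain ⟨h1, h2, h3⟩ := ih hmem
      rw [List.idxOf_cons_ne _ hx]
      refine ⟨by simpa using h1, by simpa using h2, ?_⟩
      intro k hk
      cases k with
      | zero => simpa using hx
      | succ k' => simpa using h3 k' (by omega)

theorem pvBadB_iff (m : List (Int × List Int)) (c : List Int) :
    pvBadB m c = true ↔
      ∃ b ∈ c, ∃ a ∈ (PySem.Dict.mk m).getD b [], a ∈ c ∧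
        (pvFirstIdx c).getD a 0 < (pvLastIdx c).getD b 0 ∧
        b ∉ (PySem.Dict.mk m).getD a [] := by
  unfold pvBadB
  simp only [List.any_eq_true, Bool.and_eq_true, decide_eq_true_eq, Bool.not_eq_true',
    pvFirstIdx_contains]
  constructor
  · rintro ⟨b, hbk, a, ha, hfirst, hlt, hnmem⟩
    have hbc : b ∈ c := by
      rw [← pvLastIdx_contains c b, PySem.Dict.contains_eq_decide_mem_keys]
      simpa using hbk
    exact ⟨b, hbc, a, ha, hfirst, hlt, by simpa [List.contains_iff_mem] using hnmem⟩
  · rintro ⟨b, hbc, a, ha, hfirst, hlt, hnmem⟩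
    have hbk : b ∈ (pvLastIdx c).keys := by
      have := (pvLastIdx_contains c b).mpr hbc
      rw [PySem.Dict.contains_eq_decide_mem_keys] at this
      simpa using this
    exact ⟨b, hbk, a, ha, hfirst, hlt, by simpa [List.contains_iff_mem] using hnmem⟩

-- the heart: A's flag is the negation of B's flag
theorem pv_flag_eq (m : List (Int × List Int)) (c : List Int) :
    pvGoodA m c = !pvBadB m c := by
  have key : (pvGoodA m c = true) ↔ ¬ (pvBadB m c = true) := by
    rw [pvGoodA_iff, pvBadB_iff]
    constructor
    · rintro hGA ⟨b, hbc, a, ha, hac, hlt, hnmem⟩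
      have hfa := pvFirstIdx_getD c a hac
      have hlb := pvLastIdx_getD c b hbc
      rw [hfa, hlb] at hlt
      have hlt' : c.idxOf a < pvLa c b := by exact_mod_cast hlt
      obtain ⟨hi1, hi2, _⟩ := pv_idxOf_spec c a hac
      obtain ⟨hj1, hj2, _⟩ := pvLa_spec c b hbc
      rcases hGA (c.idxOf a) (pvLa c b) hlt' hj1 with hcase | hcase
      · rw [hi2, hj2] at hcase
        exact hnmem hcase
      · rw [hi2, hj2] at hcase
        exact hcase ha
    · intro hnb i j hij hj
      by_contra hcon
      push_neg at hcon
      obtain ⟨hnm1, hm2⟩ := hcon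
      set a := c.getD i 0 with hadef
      set b := c.getD j 0 with hbdef
      have hac : a ∈ c := pv_getD_mem _ _ (by omega)
      have hbc : b ∈ c := pv_getD_mem _ _ hj
      have ha : a ∈ (PySem.Dict.mk m).getD b [] := not_not.mp (by simpa using hm2)
      apply hnb
      refine ⟨b, hbc, a, ha, hac, ?_, hnm1⟩
      rw [pvFirstIdx_getD c a hac, pvLastIdx_getD c b hbc]
      have h1 : c.idxOf a ≤ i := by
        by_contra hgt
        push_neg at hgt
        exact (pv_idxOf_spec c a hac).2.2 i hgt hadef.symm
      have h2 : j ≤ pvLa c b := by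
        by_contra hgt
        push_neg at hgt
        exact (pvLa_spec c b hbc).2.2 j hgt hj hbdef.symm
      have : c.idxOf a < pvLa c b := by omega
      exact_mod_cast this
  cases hA : pvGoodA m c <;> cases hB : pvBadB m c <;> simp_all

-- ===== VERDICT (by name: the statement is the Claim_ definition above) =====
theorem get_good_lines_spec : Claim_equal_get_good_lines := by
  intro mappings commands _hdom
  unfold Spec_get_good_lines get_good_lines get_good_lines_alt
  rw [PySem.List.foldl_append_if, PySem.List.foldl_append_if]
  simp only [List.nil_append, List.map_id']
  exact List.filter_congr (fun c _ => by rw [pv_flag_eq mappings c])
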